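-- pv_equiv track=rewrite | github.com/FreddyMachaca/INF-111 | PRACTICA PRIMER PARCIAL/Ejercicio11/Python/GenerarSecuencia.py | generar_secuencia
-- ===== SOURCE A (Python) =====
-- def generar_secuencia(n):
--     secuencia = []
--     contador = 0
--
--     for i in range(n):
--         if contador == 3:
--             secuencia.append(0)
--             contador = 0
--         else:
--             secuencia.append(1)
--             contador += 1
--
--     return secuencia
-- ===== SOURCE B (Python) =====
-- def generar_secuencia(n):
--     return ([1, 1, 1, 0] * (n // 4 + 1))[:n]
-- ===== Notes on version B (the rewrite author's own statement) =====
-- stated objective: simpler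
-- what changed: Replaces the per-element loop with a running counter by building whole [1,1,1,0] periods via list repetition and slicing to length n.
import Mathlib
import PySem

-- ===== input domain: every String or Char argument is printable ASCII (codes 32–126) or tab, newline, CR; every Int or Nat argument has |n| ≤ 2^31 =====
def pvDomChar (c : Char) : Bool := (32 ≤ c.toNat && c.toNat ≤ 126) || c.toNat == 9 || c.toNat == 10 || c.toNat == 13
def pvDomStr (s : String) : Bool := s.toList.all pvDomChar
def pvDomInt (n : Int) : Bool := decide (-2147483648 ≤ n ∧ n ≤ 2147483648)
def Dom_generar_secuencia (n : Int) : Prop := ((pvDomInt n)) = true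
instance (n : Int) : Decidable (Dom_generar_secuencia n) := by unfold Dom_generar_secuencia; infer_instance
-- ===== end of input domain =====

-- B builds whole [1,1,1,0] periods and slices to length n, instead of A's per-element counter loop (objective: simpler).

-- ===== PORT A =====
def generar_secuencia (n : Int) : List Int :=
  ((PySem.List.pyRange 0 n 1).foldl
    (fun (st : List Int × Int) _ =>
      if st.2 == 3 then (st.1 ++ [0], 0) else (st.1 ++ [1], st.2 + 1))
    ([], 0)).1

-- ===== PORT B =====
-- [1,1,1,0] * k is ported as flattening k copies; [:n] is PySem.List.slice.
def generar_secuencia_alt (n : Int) : List Int :=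
  PySem.List.slice
    ((List.replicate (PySem.Int.floordiv n 4 + 1).toNat ([1, 1, 1, 0] : List Int)).flatten)
    none (some n)

-- ===== PRECONDITION & SPEC =====
def Spec_generar_secuencia (n : Int) (out : List Int) : Prop := out = generar_secuencia_alt n
instance (n : Int) (out : List Int) : Decidable (Spec_generar_secuencia n out) := by unfold Spec_generar_secuencia; infer_instance

-- ===== CLAIM (what is proved, stated in full; the proofs are below) =====
def Claim_equal_generar_secuencia : Prop := ∀ (n : Int), Dom_generar_secuencia n → Spec_generar_secuencia n (generar_secuencia n)

-- ===== LEMMAS AND PROOFS =====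

def pvPat (m : Nat) : List Int := (List.range m).map (fun k => if k % 4 = 3 then 0 else 1)

lemma pvA_closed (m : Nat) :
    (PySem.List.pyRange 0 (m : Int) 1).foldl
      (fun (st : List Int × Int) _ =>
        if st.2 == 3 then (st.1 ++ [0], 0) else (st.1 ++ [1], st.2 + 1))
      ([], 0) = (pvPat m, ((m % 4 : Nat) : Int)) := by
  induction m with
  | zero => simp [PySem.List.pyRange_one_eq_nil, pvPat]
  | succ m ih =>
    have h : PySem.List.pyRange 0 ((m : Int) + 1) 1
        = PySem.List.pyRange 0 (m : Int) 1 ++ [(m : Int)] :=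
      PySem.List.pyRange_one_succ_right (by positivity)
    push_cast
    rw [h, List.foldl_append, ih]
    by_cases h3 : m % 4 = 3
    · simp [h3, pvPat, List.range_succ]
      omega
    · have hne : ¬ ((m : Int) % 4 = 3) := by omega
      simp [pvPat, List.range_succ, h3, hne]
      omega

lemma pvFlatten_replicate (j : Nat) :
    (List.replicate j ([1, 1, 1, 0] : List Int)).flatten = pvPat (4 * j) := by
  induction j with
  | zero => simp [pvPat]
  | succ j ih =>
    rw [List.replicate_succ', List.flatten_append, ih]
    have e : 4 * (j + 1) = (((4 * j + 1) + 1) + 1) + 1 := by omega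
    have h0 : (4 * j) % 4 = 0 := by omega
    have h1 : (4 * j + 1) % 4 = 1 := by omega
    have h2 : (4 * j + 2) % 4 = 2 := by omega
    have h3 : (4 * j + 3) % 4 = 3 := by omega
    simp [pvPat, e, List.range_succ, h0, h1, h2, h3]

lemma pvPat_take (m N : Nat) (h : m ≤ N) : (pvPat N).take m = pvPat m := by
  simp [pvPat, ← List.map_take, List.take_range, Nat.min_eq_left h]

-- ===== VERDICT (by name: the statement is the Claim_ definition above) =====
theorem generar_secuencia_spec : Claim_equal_generar_secuencia := by
  intro n _
  unfold Spec_generar_secuencia generar_secuencia generar_secuencia_alt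
  by_cases hle : n ≤ 0
  · -- A returns []
    rw [PySem.List.pyRange_one_eq_nil hle]
    rcases lt_or_eq_of_le hle with hlt | heq
    · -- n < 0 : n // 4 + 1 ≤ 0, so the repeated list is empty; any slice of [] is []
      have hk : (PySem.Int.floordiv n 4 + 1).toNat = 0 := by
        rw [PySem.Int.floordiv_eq_ediv_of_pos (by norm_num)]
        omega
      rw [hk]
      simp [PySem.List.slice, PySem.List.clampIdx]
    · -- n = 0 : slice to 0 is take 0 = []
      subst heq
      rw [PySem.List.slice_to _ le_rfl]
      simp
  · -- n > 0
    have hpos : (0:Int) < n := by omega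
    obtain ⟨m, rfl⟩ : ∃ m : Nat, n = (m : Int) := ⟨n.toNat, (Int.toNat_of_nonneg hpos.le).symm⟩
    rw [pvA_closed, PySem.List.slice_to _ (by positivity)]
    have hfd : PySem.Int.floordiv (m : Int) 4 + 1 = ((m / 4 + 1 : Nat) : Int) := by
      rw [PySem.Int.floordiv_eq_ediv_of_pos (by norm_num)]
      omega
    rw [hfd]
    simp only [Int.toNat_natCast]
    rw [pvFlatten_replicate]
    exact (pvPat_take m _ (by omega)).symm
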